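-- pv_equiv track=rewrite | github.com/swadeshbalajee/galaxy_morphology_fp | src/data/download_galaxy_zoo.py | pick_column
-- ===== SOURCE A (Python) =====
-- from typing import Iterable
--
-- def pick_column(
--     columns: Iterable[str],
--     required_terms: list[str],
--     preferred_terms: list[str] | None = None,
-- ) -> str | None:
--     preferred_terms = preferred_terms or []
--     candidates: list[tuple[int, str]] = []
--     for column in columns:
--         column_l = column.lower()
--         if all(term.lower() in column_l for term in required_terms):
--             score = sum(term.lower() in column_l for term in preferred_terms)
--             candidates.append((score, column))
--     if not candidates:
--         return None
--     candidates.sort(key=lambda item: (-item[0], item[1]))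
--     return candidates[0][1]
-- ===== SOURCE B (Python) =====
-- def pick_column(columns, required_terms, preferred_terms=None):
--     required = [t.lower() for t in required_terms]
--     preferred = [t.lower() for t in (preferred_terms or [])]
--     best = None  # (score, column) of the best candidate seen so far
--     for column in columns:
--         cl = column.lower()
--         if all(t in cl for t in required):
--             score = sum(t in cl for t in preferred)
--             if best is None or score > best[0] or (score == best[0] and column < best[1]):
--                 best = (score, column)
--     return None if best is None else best[1]
-- ===== Notes on version B (the rewrite author's own statement) =====
-- stated objective: simpler
-- what changed: B lowers the term lists once and replaces A's candidate list + sort-by-(-score,name) + take-first with a single pass keeping one running-best (score, column) pair updated on strict improvement.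
import Mathlib
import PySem

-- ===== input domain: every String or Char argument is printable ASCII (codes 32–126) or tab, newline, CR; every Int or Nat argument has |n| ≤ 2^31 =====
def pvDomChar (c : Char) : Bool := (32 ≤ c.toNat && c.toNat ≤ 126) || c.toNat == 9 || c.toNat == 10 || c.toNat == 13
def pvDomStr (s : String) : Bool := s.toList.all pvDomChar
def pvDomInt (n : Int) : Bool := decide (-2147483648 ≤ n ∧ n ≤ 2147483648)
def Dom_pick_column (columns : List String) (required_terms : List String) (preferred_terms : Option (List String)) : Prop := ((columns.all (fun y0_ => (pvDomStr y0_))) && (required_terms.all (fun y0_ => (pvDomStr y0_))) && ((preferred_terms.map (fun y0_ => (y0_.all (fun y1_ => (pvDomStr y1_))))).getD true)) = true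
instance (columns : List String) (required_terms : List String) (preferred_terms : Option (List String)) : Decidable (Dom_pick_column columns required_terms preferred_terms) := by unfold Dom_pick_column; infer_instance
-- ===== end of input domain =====

-- B replaces A's candidate list + stable sort by (-score, name) + first element with a single
-- running-best pass (objective: simpler; same return value, no side effects).

-- ===== PORT A =====
def pick_column (columns : List String) (required_terms : List String) (preferred_terms : Option (List String)) : Option String :=
  -- `preferred_terms = preferred_terms or []` (None and [] both become [])
  let preferred := preferred_terms.getD []
  let candidates : List (Int × String) := columns.foldl (fun acc column =>
    let column_l := PySem.Str.lower column
    if required_terms.all (fun term => PySem.Str.isIn (PySem.Str.lower term) column_l) then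
      acc ++ [(preferred.foldl (fun s term =>
        s + (if PySem.Str.isIn (PySem.Str.lower term) column_l then 1 else 0)) (0 : Int), column)]
    else acc) []
  if candidates = [] then none
  else
    match PySem.List.sorted2 candidates (fun item => -item.1) (fun item => item.2) with
    | [] => none
    | item :: _ => some item.2

-- ===== PORT B =====
def pick_column_alt (columns : List String) (required_terms : List String) (preferred_terms : Option (List String)) : Option String :=
  let required := required_terms.map PySem.Str.lower
  let preferred := (preferred_terms.getD []).map PySem.Str.lower
  let best := columns.foldl (fun best column =>
    let cl := PySem.Str.lower column
    if required.all (fun t => PySem.Str.isIn t cl) then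
      let score := preferred.foldl (fun s t => s + (if PySem.Str.isIn t cl then 1 else 0)) (0 : Int)
      match best with
      | none => some (score, column)
      | some b => if score > b.1 ∨ (score = b.1 ∧ column < b.2) then some (score, column) else some b
    else best) (none : Option (Int × String))
  best.map (·.2)

-- ===== PRECONDITION & SPEC =====
def Spec_pick_column (columns : List String) (required_terms : List String) (preferred_terms : Option (List String)) (out : Option String) : Prop := out = pick_column_alt columns required_terms preferred_terms
instance (columns : List String) (required_terms : List String) (preferred_terms : Option (List String)) (out : Option String) : Decidable (Spec_pick_column columns required_terms preferred_terms out) := by unfold Spec_pick_column; infer_instance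

-- ===== CLAIM (what is proved, stated in full; the proofs are below) =====
def Claim_equal_pick_column : Prop := ∀ (columns : List String) (required_terms : List String) (preferred_terms : Option (List String)), Dom_pick_column columns required_terms preferred_terms → Spec_pick_column columns required_terms preferred_terms (pick_column columns required_terms preferred_terms)

-- ===== LEMMAS AND PROOFS =====

/-- The comparator sorted2 uses for the key (-item.1, item.2). -/
def pvBefore (a b : Int × String) : Bool :=
  decide ((-a.1) < (-b.1)) || (!decide ((-b.1) < (-a.1)) && decide (a.2 < b.2))

/-- Running "keep the earlier element unless the new one is strictly `before` it". -/
def pvPick {α : Type} (before : α → α → Bool) (b : Option α) (x : α) : Option α :=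
  match b with
  | none => some x
  | some y => if before x y then some x else some y

theorem head?_insertBy {α : Type} (before : α → α → Bool) (x : α) (ys : List α) :
    (PySem.List.insertBy before x ys).head? = pvPick before ys.head? x := by
  cases ys with
  | nil => simp [PySem.List.insertBy, pvPick]
  | cons y t =>
    simp only [PySem.List.insertBy, pvPick, List.head?_cons]
    split <;> simp

theorem head?_foldl_insertBy {α : Type} (before : α → α → Bool) (xs : List α) (acc : List α) :
    (xs.foldl (fun a x => PySem.List.insertBy before x a) acc).head?
      = xs.foldl (pvPick before) acc.head? := by
  induction xs generalizing acc with
  | nil => rfl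
  | cons x t ih => simp only [List.foldl_cons, ih, head?_insertBy]

theorem foldl_pvPick_eq_none_iff {α : Type} (before : α → α → Bool) (xs : List α) (b : Option α) :
    xs.foldl (pvPick before) b = none ↔ b = none ∧ xs = [] := by
  induction xs generalizing b with
  | nil => simp
  | cons x t ih =>
    simp only [List.foldl_cons, ih]
    constructor
    · rintro ⟨h, -⟩
      cases b with
      | none => simp [pvPick] at h
      | some y => simp only [pvPick] at h; split at h <;> simp_all
    · rintro ⟨-, h⟩; cases h

theorem foldl_append_singleton_if {α β : Type} (p : α → Bool) (g : α → β) (xs : List α) (init : List β) :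
    xs.foldl (fun acc c => if p c then acc ++ [g c] else acc) init
      = init ++ (xs.filter p).map g := by
  induction xs generalizing init with
  | nil => simp
  | cons x t ih =>
    simp only [List.foldl_cons, List.filter_cons]
    split <;> simp_all

theorem foldl_pvPick_filter_map {α β : Type} (before : β → β → Bool) (p : α → Bool) (g : α → β)
    (xs : List α) (b : Option β) :
    ((xs.filter p).map g).foldl (pvPick before) b
      = xs.foldl (fun b c => if p c then pvPick before b (g c) else b) b := by
  induction xs generalizing b with
  | nil => rfl
  | cons x t ih =>
    simp only [List.filter_cons, List.foldl_cons]
    split <;> simp [ih]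

/-- sorted2's comparator equals B's strict-improvement test. -/
theorem before_eq_cond (s : Int) (c : String) (y : Int × String) :
    pvBefore (s, c) y = decide (s > y.1 ∨ (s = y.1 ∧ c < y.2)) := by
  unfold pvBefore
  rcases lt_trichotomy s y.1 with h | h | h
  · simp [show ¬((-s : Int) < -y.1) by omega, show ((-y.1 : Int) < -s) by omega,
      show ¬(s > y.1) by omega, show s ≠ y.1 by omega]
  · simp [h]
  · simp [show ((-s : Int) < -y.1) by omega, show (s > y.1) by omega]

/-- Fusing B's single pass into "pvPick over the filtered, scored candidates". -/
theorem fuseB (p : String → Bool) (sc : String → Int) (columns : List String) :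
    columns.foldl (fun best column =>
      if p column then
        match best with
        | none => some (sc column, column)
        | some b => if sc column > b.1 ∨ (sc column = b.1 ∧ column < b.2)
            then some (sc column, column) else some b
      else best) none
    = ((columns.filter p).map (fun c => (sc c, c))).foldl (pvPick pvBefore) none := by
  rw [foldl_pvPick_filter_map]
  congr 1
  funext b c
  by_cases hpc : p c
  · simp only [hpc, if_true]
    cases b with
    | none => rfl
    | some y => simp only [pvPick, before_eq_cond, decide_eq_true_eq]
  · simp [hpc]

/-- A's "sort the candidates, take the first (or None)" is the running minimum. -/
theorem headSorted (cands : List (Int × String)) :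
    (if cands = [] then (none : Option String)
     else match PySem.List.sorted2 cands (fun item => -item.1) (fun item => item.2) with
       | [] => none
       | item :: _ => some item.2)
    = (cands.foldl (pvPick pvBefore) none).map (fun item => item.2) := by
  by_cases hc : cands = []
  · simp [hc]
  · simp only [hc, if_false]
    have hs2 : PySem.List.sorted2 cands (fun item => -item.1) (fun item => item.2)
        = cands.foldl (fun acc x => PySem.List.insertBy pvBefore x acc) [] := rfl
    rw [hs2]
    have hh := head?_foldl_insertBy pvBefore cands []
    cases hs : cands.foldl (fun acc x => PySem.List.insertBy pvBefore x acc) [] with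
    | nil =>
      rw [hs] at hh
      simp only [List.head?_nil] at hh
      exact absurd ((foldl_pvPick_eq_none_iff pvBefore _ _).mp hh.symm).2 hc
    | cons a t =>
      rw [hs] at hh
      simp only [List.head?_cons, List.head?_nil] at hh
      rw [← hh]
      rfl

-- ===== VERDICT (by name: the statement is the Claim_ definition above) =====
theorem pick_column_spec : Claim_equal_pick_column := by
  intro columns required_terms preferred_terms _
  unfold Spec_pick_column pick_column pick_column_alt
  simp only [List.all_map, List.foldl_map, Function.comp_def]
  rw [foldl_append_singleton_if, List.nil_append, fuseB, headSorted]
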